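-- pv_equiv track=rewrite | github.com/reilost/appspider | appspider/spiders/wenshucourt/wenshucore.py | StrToLong3
-- ===== SOURCE A (Python) =====
-- def StrToLong3(s, i):
--     v10 = i
--     v4 = v10
--     v7 = 1
--     v6 = len(s)
--     while v7 < v6:
--         v4 += (v10 + v7 + (ord(s[v7]) << (v7 & 0xf)) + (v7 % 4) - ord(s[v7]))
--         v7 += 1
--     return v4
-- ===== SOURCE B (Python) =====
-- def StrToLong3(s, i):
--     n = len(s)
--     if n < 2:
--         return i
--     m = n - 1
--     # index-arithmetic contribution in closed form:
--     #   m copies of i; sum of v7 over 1..m = m*n//2; sum of v7%4 over 1..m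
--     idx_part = m * i + m * n // 2 + 6 * (m // 4) + m % 4 * (m % 4 + 1) // 2
--     # character contribution: one pass over s[1:]
--     char_part = sum((ord(c) << ((k + 1) & 0xF)) - ord(c) for k, c in enumerate(s[1:]))
--     return i + idx_part + char_part
-- ===== Notes on version B (the rewrite author's own statement) =====
-- stated objective: alternative
-- what changed: A's single mixed-accumulator while-loop is replaced by closed-form aggregates for all index-arithmetic terms (m*i, Gauss sum m*n//2, closed form for sum of v7%4) plus one character-only summation over s[1:].
import Mathlib
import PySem

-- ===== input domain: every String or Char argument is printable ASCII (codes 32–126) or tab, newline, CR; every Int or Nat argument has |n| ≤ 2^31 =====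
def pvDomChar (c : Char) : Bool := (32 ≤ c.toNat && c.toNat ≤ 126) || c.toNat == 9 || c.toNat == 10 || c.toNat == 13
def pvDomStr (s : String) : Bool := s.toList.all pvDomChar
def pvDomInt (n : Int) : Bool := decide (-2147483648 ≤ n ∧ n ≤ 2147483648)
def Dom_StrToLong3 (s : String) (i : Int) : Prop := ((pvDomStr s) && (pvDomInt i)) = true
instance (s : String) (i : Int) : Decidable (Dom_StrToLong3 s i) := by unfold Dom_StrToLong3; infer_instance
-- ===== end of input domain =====

-- B replaces A's single mixed-accumulator loop by closed-form index aggregates plus one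
-- character-only summation over s[1:] (alternative decomposition, same O(n) cost).

-- ===== PORT A =====
-- while-loop over v7 = 1..len(s)-1 with one accumulator v4; the shift x << k is ported as
-- Nat shiftLeft on ord values (exact: ord and the masked shift amount are nonnegative);
-- s[v7] is ported with pyGetD (the index is always in range, the default is never read).
def StrToLong3 (s : String) (i : Int) : Int :=
  let v10 := i
  let cs := s.toList
  let v6 : Int := cs.length
  (PySem.List.pyRange 1 v6 1).foldl
    (fun v4 v7 =>
      let c : Nat := (PySem.List.pyGetD cs v7 ' ').toNat
      v4 + (v10 + v7 + ((c <<< (PySem.Int.band v7 15).toNat : Nat) : Int)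
            + PySem.Int.mod v7 4 - (c : Int)))
    v10

-- ===== PORT B =====
-- closed-form index part m*i + m*n//2 + 6*(m//4) + m%4*(m%4+1)//2, plus one sum over
-- enumerate(s[1:]); the shift is ported as Nat shiftLeft (exact on nonnegative values).
def StrToLong3_alt (s : String) (i : Int) : Int :=
  let cs := s.toList
  let n : Int := cs.length
  if n < 2 then i
  else
    let m := n - 1
    let idxPart := m * i + PySem.Int.floordiv (m * n) 2 + 6 * PySem.Int.floordiv m 4
      + PySem.Int.floordiv (PySem.Int.mod m 4 * (PySem.Int.mod m 4 + 1)) 2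
    let charPart := ((PySem.List.enumerate (cs.drop 1) 0).map
        (fun p => ((p.2.toNat <<< (PySem.Int.band (p.1 + 1) 15).toNat : Nat) : Int)
                  - (p.2.toNat : Int))).sum
    i + idxPart + charPart

-- ===== PRECONDITION & SPEC =====
def Spec_StrToLong3 (s : String) (i : Int) (out : Int) : Prop := out = StrToLong3_alt s i
instance (s : String) (i : Int) (out : Int) : Decidable (Spec_StrToLong3 s i out) := by unfold Spec_StrToLong3; infer_instance

-- ===== CLAIM (what is proved, stated in full; the proofs are below) =====
def Claim_equal_StrToLong3 : Prop := ∀ (s : String) (i : Int), Dom_StrToLong3 s i → Spec_StrToLong3 s i (StrToLong3 s i)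

-- ===== LEMMAS AND PROOFS =====

-- closed form of the index-arithmetic sum: Σ_(k<m) (i + (k+1) + (k+1)%4)
theorem pvIdxSum : ∀ (i : Int) (m : Nat),
    ((List.range m).map (fun (k : Nat) => i + ((k : Int) + 1) + (((k + 1) % 4 : Nat) : Int))).sum
      = (m : Int) * i + ((m : Int) * ((m : Int) + 1)) / 2 + 6 * ((m : Int) / 4)
        + ((m : Int) % 4 * ((m : Int) % 4 + 1)) / 2 := by
  intro i m
  induction m with
  | zero => norm_num
  | succ m ih =>
    rw [List.range_succ, List.map_append, List.sum_append]
    simp only [List.map_cons, List.map_nil, List.sum_cons, List.sum_nil, ih]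
    have hi : ((m : Int) + 1) * i = (m : Int) * i + i := by ring
    have hg : (((m : Int) + 1) * (((m : Int) + 1) + 1)) / 2
        = ((m : Int) * ((m : Int) + 1)) / 2 + ((m : Int) + 1) := by
      have h2 : ((m : Int) + 1) * (((m : Int) + 1) + 1)
          = (m : Int) * ((m : Int) + 1) + ((m : Int) + 1) * 2 := by ring
      rw [h2, Int.add_mul_ediv_right _ _ (by norm_num : (2:Int) ≠ 0)]
    have hm : 6 * (((m : Int) + 1) / 4) + (((m : Int) + 1) % 4 * (((m : Int) + 1) % 4 + 1)) / 2
        = 6 * ((m : Int) / 4) + ((m : Int) % 4 * ((m : Int) % 4 + 1)) / 2 + (((m + 1) % 4 : Nat) : Int) := by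
      rcases (show (m : Int) % 4 = 0 ∨ (m : Int) % 4 = 1 ∨ (m : Int) % 4 = 2 ∨ (m : Int) % 4 = 3 by omega) with h|h|h|h <;>
        [ (have h2 : ((m : Int) + 1) % 4 = 1 := by omega);
          (have h2 : ((m : Int) + 1) % 4 = 2 := by omega);
          (have h2 : ((m : Int) + 1) % 4 = 3 := by omega);
          (have h2 : ((m : Int) + 1) % 4 = 0 := by omega)] <;>
        (rw [h, h2]; have h3 : (((m + 1) % 4 : Nat) : Int) = ((m : Int) + 1) % 4 := by omega
         rw [h3, h2]; omega)
    push_cast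
    push_cast at hm
    linarith [hi, hg, hm]

-- a sum over enumerate(xs, s) as a sum over range(len(xs))
theorem pvSumEnum (f : Int → Char → Int) :
    ∀ (xs : List Char) (s : Int),
      ((PySem.List.enumerate xs s).map (fun p => f p.1 p.2)).sum
        = ((List.range xs.length).map (fun (k : Nat) => f (s + (k : Int)) (xs.getD k ' '))).sum := by
  intro xs
  induction xs with
  | nil => intro s; simp [PySem.List.enumerate_nil]
  | cons x t ih =>
    intro s
    rw [PySem.List.enumerate_cons]
    simp only [List.map_cons, List.sum_cons, List.length_cons, List.range_succ_eq_map]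
    rw [ih (s + 1)]
    have : ((List.range t.length).map (fun (k : Nat) => f (s + 1 + (k : Int)) (t.getD k ' ')))
        = ((List.range t.length).map ((fun (k : Nat) => f (s + (k : Int)) ((x :: t).getD k ' ')) ∘ Nat.succ)) := by
      apply List.map_congr_left
      intro k _
      simp only [Function.comp, List.getD_cons_succ]
      congr 1
      push_cast; ring
    rw [this]
    simp

-- splitting a sum of pointwise sums
theorem pvSumSplit (f1 f2 : Nat → Int) (l : List Nat) :
    (l.map (fun k => f1 k + f2 k)).sum = (l.map f1).sum + (l.map f2).sum := by
  induction l with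
  | nil => simp
  | cons a t ih => simp only [List.map_cons, List.sum_cons, ih]; ring

theorem pvMainEq (s : String) (i : Int) : StrToLong3 s i = StrToLong3_alt s i := by
  unfold StrToLong3 StrToLong3_alt
  simp only []
  set cs := s.toList with hcs
  by_cases h2 : (cs.length : Int) < 2
  · rw [if_pos h2, PySem.List.pyRange_one_eq_nil (by omega)]
    simp
  · rw [if_neg h2]
    have hL : 2 ≤ cs.length := by exact_mod_cast not_lt.mp h2
    rw [PySem.List.foldl_add]
    rw [PySem.List.pyRange_one, List.map_map]
    have ht : ((cs.length : Int) - 1).toNat = cs.length - 1 := by omega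
    rw [ht]
    simp only [show ∀ (k : Nat), (1 : Int) + (k : Int) = ((k + 1 : Nat) : Int) from fun k => by push_cast; ring]
    have hmc : (List.map
          ((fun v7 : Int =>
              i + v7 + (((PySem.List.pyGetD cs v7 ' ').toNat <<< (PySem.Int.band v7 15).toNat : Nat) : Int) + PySem.Int.mod v7 4 -
                ((PySem.List.pyGetD cs v7 ' ').toNat : Int)) ∘
            fun (k : Nat) => ((k + 1 : Nat) : Int))
          (List.range (cs.length - 1)))
        = List.map (fun (k : Nat) =>
            (fun (k : Nat) => i + ((k : Int) + 1) + (((k + 1) % 4 : Nat) : Int)) k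
            + (fun (k : Nat) => (((cs.getD (k + 1) ' ').toNat <<< ((k + 1) &&& 15) : Nat) : Int)
               - ((cs.getD (k + 1) ' ').toNat : Int)) k)
            (List.range (cs.length - 1)) := by
      apply List.map_congr_left
      intro k _
      simp only [Function.comp, PySem.List.pyGetD_natCast]
      have hb := PySem.Int.band_natCast (k + 1) 15
      norm_cast at hb
      have hm := PySem.Int.mod_natCast (k + 1) 4
      norm_cast at hm
      rw [hb, hm, Int.toNat_natCast]
      push_cast
      ring
    rw [hmc, pvSumSplit, pvIdxSum]
    rw [pvSumEnum (fun a c => (((c.toNat <<< (PySem.Int.band (a + 1) 15).toNat : Nat)) : Int) - (c.toNat : Int)) (List.drop 1 cs) 0]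
    simp only [List.length_drop]
    have hbc : (List.map (fun (k : Nat) => (((((List.drop 1 cs).getD k ' ').toNat <<< (PySem.Int.band ((0 : Int) + (k : Int) + 1) 15).toNat : Nat)) : Int) - (((List.drop 1 cs).getD k ' ').toNat : Int))
          (List.range (cs.length - 1)))
        = List.map (fun (k : Nat) => (((cs.getD (k + 1) ' ').toNat <<< ((k + 1) &&& 15) : Nat) : Int)
               - ((cs.getD (k + 1) ' ').toNat : Int)) (List.range (cs.length - 1)) := by
      apply List.map_congr_left
      intro k _
      have hg : (List.drop 1 cs).getD k ' ' = cs.getD (k + 1) ' ' := by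
        simp [List.getD_eq_getElem?_getD]
      have hz : ((0 : Int) + (k : Int) + 1) = ((k + 1 : Nat) : Int) := by push_cast; ring
      have hb := PySem.Int.band_natCast (k + 1) 15
      norm_cast at hb
      rw [hg, hz, hb, Int.toNat_natCast]
    rw [hbc]
    have hc : ((cs.length - 1 : Nat) : Int) = (cs.length : Int) - 1 := by omega
    have hXY : ((cs.length - 1 : Nat) : Int) * i + (((cs.length - 1 : Nat) : Int) * (((cs.length - 1 : Nat) : Int) + 1)) / 2
          + 6 * (((cs.length - 1 : Nat) : Int) / 4)
          + (((cs.length - 1 : Nat) : Int) % 4 * (((cs.length - 1 : Nat) : Int) % 4 + 1)) / 2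
        = ((cs.length : Int) - 1) * i + PySem.Int.floordiv (((cs.length : Int) - 1) * (cs.length : Int)) 2
          + 6 * PySem.Int.floordiv ((cs.length : Int) - 1) 4
          + PySem.Int.floordiv (PySem.Int.mod ((cs.length : Int) - 1) 4 * (PySem.Int.mod ((cs.length : Int) - 1) 4 + 1)) 2 := by
      rw [PySem.Int.floordiv_eq_ediv_of_pos (by norm_num : (0:Int) < 2),
        PySem.Int.floordiv_eq_ediv_of_pos (by norm_num : (0:Int) < 4),
        PySem.Int.mod_eq_emod_of_pos (by norm_num : (0:Int) < 4),
        PySem.Int.floordiv_eq_ediv_of_pos (by norm_num : (0:Int) < 2), hc]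
      have h1 : ((cs.length : Int) - 1 + 1) = (cs.length : Int) := by ring
      rw [h1]
    rw [hXY]
    ring

-- ===== VERDICT (by name: the statement is the Claim_ definition above) =====
theorem StrToLong3_spec : Claim_equal_StrToLong3 := by
  intro s i _
  unfold Spec_StrToLong3
  exact pvMainEq s i
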